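-- pv_equiv track=rewrite | github.com/jw3329/leetcode-problem-solving | review-lists/2380. Time Needed to Rearrange a Binary String/solution.py | secondsToRemoveOccurrences
-- ===== SOURCE A (Python) =====
-- def secondsToRemoveOccurrences(s: str) -> int:
--     zeros = 0
--     seconds = 0
--     for i in range(len(s)):
--         zeros += s[i] == '0'
--         if s[i] == '1' and zeros > 0:
--             seconds = max(seconds + 1, zeros)
--     return seconds
-- ===== SOURCE B (Python) =====
-- def secondsToRemoveOccurrences(s: str) -> int:
--     # closed form: collect the zero-prefix count at each '1' that has a '0' before it;
--     # the answer is the max of z_j + (number of later such ones).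
--     zs = []
--     z = 0
--     for c in s:
--         if c == '0':
--             z += 1
--         elif c == '1' and z > 0:
--             zs.append(z)
--     m = len(zs)
--     return max((zj + (m - 1 - j) for j, zj in enumerate(zs)), default=0)
-- ===== Notes on version B (the rewrite author's own statement) =====
-- stated objective: alternative
-- what changed: Replaces A's incremental max-recurrence (seconds = max(seconds+1, zeros) updated at each qualifying one-bit) by a closed form: collect the zero-prefix count z_j at each one-bit preceded by a zero, then return max over j of z_j + (m-1-j).
import Mathlib
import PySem

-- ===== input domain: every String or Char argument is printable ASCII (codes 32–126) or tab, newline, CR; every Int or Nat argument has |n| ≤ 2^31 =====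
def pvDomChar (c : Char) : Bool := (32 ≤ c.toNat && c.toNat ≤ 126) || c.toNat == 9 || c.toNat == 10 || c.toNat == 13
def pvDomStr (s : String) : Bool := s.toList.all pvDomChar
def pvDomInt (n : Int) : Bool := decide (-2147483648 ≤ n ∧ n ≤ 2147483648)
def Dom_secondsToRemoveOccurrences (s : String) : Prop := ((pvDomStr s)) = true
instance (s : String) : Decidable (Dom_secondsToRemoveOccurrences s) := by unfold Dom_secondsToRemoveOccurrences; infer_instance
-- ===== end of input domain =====

-- B replaces A's incremental max-recurrence with a closed form over the collected
-- zero-prefix counts (objective: alternative decomposition, same O(n) cost).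

-- ===== PORT A =====
-- A's loop body: zeros += (s[i]=='0'); if s[i]=='1' and zeros>0: seconds = max(seconds+1, zeros).
-- 'for i in range(len(s)): s[i]' is exactly iteration over the characters of s in order.
def stepA (st : Int × Int) (c : Char) : Int × Int :=
  let zeros := st.1 + (if c = '0' then (1 : Int) else 0)
  let seconds := if c = '1' ∧ 0 < zeros then max (st.2 + 1) zeros else st.2
  (zeros, seconds)

def secondsToRemoveOccurrences (s : String) : Int :=
  (s.toList.foldl stepA (0, 0)).2

-- ===== PORT B =====
-- B's first loop: if c=='0': z+=1 elif c=='1' and z>0: zs.append(z)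
def altStep (st : Int × List Int) (c : Char) : Int × List Int :=
  if c = '0' then (st.1 + 1, st.2)
  else if c = '1' ∧ 0 < st.1 then (st.1, st.2 ++ [st.1])
  else st

-- B's 'max(... for j, zj in enumerate(zs)), default=0)': every generated term is ≥ 1
-- (each zj ≥ 1 and m-1-j ≥ 0), so folding max from 0 returns the same value, and 0
-- is exactly Python's default on the empty generator.
def altMax (m : Int) (zs : List Int) : Int :=
  zs.zipIdx.foldl (fun acc p => max acc (p.1 + (m - 1 - (p.2 : Int)))) 0

def secondsToRemoveOccurrences_alt (s : String) : Int :=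
  let zs := (s.toList.foldl altStep (0, [])).2
  altMax (zs.length : Int) zs

-- ===== PRECONDITION & SPEC =====
def Spec_secondsToRemoveOccurrences (s : String) (out : Int) : Prop := out = secondsToRemoveOccurrences_alt s
instance (s : String) (out : Int) : Decidable (Spec_secondsToRemoveOccurrences s out) := by unfold Spec_secondsToRemoveOccurrences; infer_instance

-- ===== CLAIM (what is proved, stated in full; the proofs are below) =====
def Claim_equal_secondsToRemoveOccurrences : Prop := ∀ (s : String), Dom_secondsToRemoveOccurrences s → Spec_secondsToRemoveOccurrences s (secondsToRemoveOccurrences s)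

-- ===== LEMMAS AND PROOFS =====

-- shifting m by one shifts every term by one, which distributes over max when the
-- accumulator is shifted too
lemma foldl_shift (l : List (Int × Nat)) (m : Int) : ∀ (a : Int),
    l.foldl (fun acc p => max acc (p.1 + (m + 1 - 1 - (p.2 : Int)))) (a + 1)
      = l.foldl (fun acc p => max acc (p.1 + (m - 1 - (p.2 : Int)))) a + 1 := by
  induction l with
  | nil => intro a; simp
  | cons p t ih =>
      intro a
      simp only [List.foldl_cons]
      rw [show max (a + 1) (p.1 + (m + 1 - 1 - (p.2 : Int)))
            = max a (p.1 + (m - 1 - (p.2 : Int))) + 1 by omega]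
      exact ih _

-- if every term of the fold is ≥ 1, starting from 0 or 1 makes no difference
lemma foldl_init01 (l : List (Int × Nat)) (m : Int) (hne : l ≠ [])
    (h : ∀ p ∈ l, 1 ≤ p.1 + (m - 1 - (p.2 : Int))) :
    l.foldl (fun acc p => max acc (p.1 + (m - 1 - (p.2 : Int)))) 0
      = l.foldl (fun acc p => max acc (p.1 + (m - 1 - (p.2 : Int)))) 1 := by
  cases l with
  | nil => exact absurd rfl hne
  | cons p t =>
      simp only [List.foldl_cons]
      have h1 : 1 ≤ p.1 + (m - 1 - (p.2 : Int)) := h p (by simp)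
      rw [show max (0 : Int) (p.1 + (m - 1 - (p.2 : Int)))
            = max 1 (p.1 + (m - 1 - (p.2 : Int))) by omega]

-- key step: appending one count z ≥ 1 to the list turns the closed form into A's recurrence
lemma altMax_append (l : List Int) (z : Int) (hz : 1 ≤ z) (hl : ∀ x ∈ l, 1 ≤ x) :
    altMax ((l ++ [z]).length : Int) (l ++ [z]) = max (altMax (l.length : Int) l + 1) z := by
  unfold altMax
  rw [List.zipIdx_append, List.zipIdx_singleton, List.foldl_append]
  simp only [List.foldl_cons, List.foldl_nil, List.length_append, List.length_singleton]
  push_cast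
  cases l with
  | nil => simp; omega
  | cons a t =>
      set l := a :: t with hldef
      have hne : l.zipIdx ≠ [] := by simp [hldef]
      have hmem : ∀ p ∈ l.zipIdx, 1 ≤ p.1 + (((l.length : Int) + 1) - 1 - (p.2 : Int)) := by
        intro p hp
        obtain ⟨x, i⟩ := p
        obtain ⟨-, hi, hx⟩ := List.mem_zipIdx hp
        have hx1 : 1 ≤ x := by
          apply hl
          rw [hx]; exact List.getElem_mem _
        simp at hi ⊢
        omega
      have h01 := foldl_init01 l.zipIdx ((l.length : Int) + 1) hne hmem
      have hsh := foldl_shift l.zipIdx (l.length : Int) 0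
      simp only [add_sub_cancel_right, zero_add, sub_self, add_zero] at h01 hsh ⊢
      rw [h01, hsh]

-- main invariant: running A's loop from state (z, altMax l) and B's from (z, l)
-- keeps 'seconds = altMax of the collected list'
lemma main_inv (cs : List Char) : ∀ (z : Int) (l : List Int),
    0 ≤ z → (∀ x ∈ l, 1 ≤ x) →
    (cs.foldl stepA (z, altMax (l.length : Int) l)).2
      = (fun r => altMax (r.length : Int) r) ((cs.foldl altStep (z, l)).2) := by
  induction cs with
  | nil => intro z l _ _; rfl
  | cons c cs ih =>
      intro z l hz hl
      simp only [List.foldl_cons]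
      by_cases h0 : c = '0'
      · have hA : stepA (z, altMax (l.length : Int) l) c = (z + 1, altMax (l.length : Int) l) := by
          simp [stepA, h0]
        have hB : altStep (z, l) c = (z + 1, l) := by simp [altStep, h0]
        rw [hA, hB]
        exact ih (z + 1) l (by omega) hl
      · by_cases h1 : c = '1' ∧ 0 < z
        · have hA : stepA (z, altMax (l.length : Int) l) c
              = (z, max (altMax (l.length : Int) l + 1) z) := by
            simp [stepA, h1.1, h1.2]
          have hB : altStep (z, l) c = (z, l ++ [z]) := by
            simp [altStep, h1.1, h1.2]
          rw [hA, hB, ← altMax_append l z (by omega) hl]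
          exact ih z (l ++ [z]) hz (by
            intro x hx
            rcases List.mem_append.1 hx with h | h
            · exact hl x h
            · simp at h; omega)
        · have hA : stepA (z, altMax (l.length : Int) l) c = (z, altMax (l.length : Int) l) := by
            simp only [stepA, h0, if_false]
            simp only [add_zero]
            rw [if_neg h1]
          have hB : altStep (z, l) c = (z, l) := by
            simp only [altStep, h0, if_false]
            rw [if_neg h1]
          rw [hA, hB]
          exact ih z l hz hl

-- ===== VERDICT (by name: the statement is the Claim_ definition above) =====
theorem secondsToRemoveOccurrences_spec : Claim_equal_secondsToRemoveOccurrences := by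
  intro s _
  show secondsToRemoveOccurrences s = secondsToRemoveOccurrences_alt s
  have := main_inv s.toList 0 [] le_rfl (by simp)
  simpa [secondsToRemoveOccurrences, secondsToRemoveOccurrences_alt, altMax] using this
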